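-- pv_equiv track=rewrite | github.com/sushilrajeeva/Leetcode | 3830-longest-alternating-subarray-after-removing-at-most-one-element/3830-longest-alternating-subarray-after-removing-at-most-one-element.py | longestAlternating
-- ===== SOURCE A (Python) =====
-- from typing import List
--
-- def longestAlternating(A: List[int]) -> int:
--     n = len(A)
--
--     def cmp(a, b):
--         return (a > b) - (a < b)
--
--     l = [1] * n
--     for i in range(1, n):
--         d = cmp(A[i], A[i - 1])
--         if d:
--             if i > 1 and cmp(A[i - 1], A[i - 2]) == -d:
--                 l[i] = l[i - 1] + 1
--             else:
--                 l[i] = 2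
--     r = [1] * n
--     for i in range(n - 2, -1, -1):
--         d = cmp(A[i + 1], A[i])
--         if d:
--             if i < n - 2 and cmp(A[i + 2], A[i + 1]) == -d:
--                 r[i] = r[i + 1] + 1
--             else:
--                 r[i] = 2
--     res = max(l)
--     for i in range(1, n - 1):
--         d = cmp(A[i + 1], A[i - 1])
--         if d:
--             L = l[i - 1] if i > 1 and cmp(A[i - 1], A[i - 2]) == -d else 1
--             R = r[i + 1] if i < n - 2 and cmp(A[i + 2], A[i + 1]) == -d else 1
--             res = max(res, L + R)
--     return res
-- ===== SOURCE B (Python) =====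
-- def longestAlternating(A):
--     n = len(A)
--     if n == 0:
--         return 0
--
--     def cmp(a, b):
--         return (a > b) - (a < b)
--
--     best = 1
--     e_prev = 1   # longest no-removal alternating run ending at j-1
--     e_prev2 = 0  # same, ending at j-2
--     up = dn = 0  # longest one-removal run ending at j-1 whose last step is up/down (0 = none)
--     for j in range(1, n):
--         d = cmp(A[j], A[j - 1])
--         if d:
--             e_cur = e_prev + 1 if (j > 1 and cmp(A[j - 1], A[j - 2]) == -d) else 2
--         else:
--             e_cur = 1
--         nup = ndn = 0
--         if d == 1 and dn:
--             nup = dn + 1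
--         if d == -1 and up:
--             ndn = up + 1
--         if j >= 2:
--             e = cmp(A[j], A[j - 2])
--             if e:
--                 Lp = e_prev2 if (j > 2 and cmp(A[j - 2], A[j - 3]) == -e) else 1
--                 cand = Lp + 1
--                 if e == 1:
--                     nup = max(nup, cand)
--                 else:
--                     ndn = max(ndn, cand)
--         best = max(best, e_cur, nup, ndn)
--         up, dn = nup, ndn
--         e_prev2, e_prev = e_prev, e_cur
--     return best
-- ===== Notes on version B (the rewrite author's own statement) =====
-- stated objective: alternative
-- what changed: Replaces A's three passes (prefix array l, suffix array r, and a combine loop over removal positions) by a single forward sweep keeping five scalars: the alternating run length ending at the current index and the two direction-tagged best lengths with one element already removed; no arrays are built.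
import Mathlib
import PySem

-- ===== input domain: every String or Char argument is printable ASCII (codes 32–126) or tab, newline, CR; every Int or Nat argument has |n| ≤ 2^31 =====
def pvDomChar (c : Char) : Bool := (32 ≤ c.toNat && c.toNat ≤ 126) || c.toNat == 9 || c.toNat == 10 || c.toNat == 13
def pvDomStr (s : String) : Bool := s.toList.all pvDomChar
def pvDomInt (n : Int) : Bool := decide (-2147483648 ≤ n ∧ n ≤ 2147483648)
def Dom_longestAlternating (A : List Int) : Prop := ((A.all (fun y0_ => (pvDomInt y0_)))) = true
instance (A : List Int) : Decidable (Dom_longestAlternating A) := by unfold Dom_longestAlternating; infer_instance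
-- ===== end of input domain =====

-- B replaces A's three index passes (prefix array l, suffix array r, combine loop) by a single
-- forward sweep carrying five scalars (run length with no removal, and the two directed
-- one-removal run lengths); equal return value on every nonempty list (A raises ValueError on []).

-- ===== PORT A =====
def pvCmp (a b : Int) : Int := (if a > b then (1 : Int) else 0) - (if a < b then 1 else 0)

-- l[i] of A's first loop (each entry depends only on l[i-1], same branches, same comparisons)
def lA (A : List Int) : Nat → Int
  | 0 => 1
  | j+1 =>
    let d := pvCmp (A.getD (j+1) 0) (A.getD j 0)
    if d ≠ 0 then
      if j+1 > 1 ∧ pvCmp (A.getD j 0) (A.getD (j-1) 0) = -d then lA A j + 1 else 2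
    else 1

-- r[k] of A's second loop (each entry depends only on r[k+1])
def rA (A : List Int) (k : Nat) : Int :=
  if h : k + 1 < A.length then
    if pvCmp (A.getD (k+1) 0) (A.getD k 0) ≠ 0 then
      if k + 2 < A.length ∧
          pvCmp (A.getD (k+2) 0) (A.getD (k+1) 0) = -(pvCmp (A.getD (k+1) 0) (A.getD k 0)) then
        rA A (k+1) + 1
      else 2
    else 1
  else 1
  termination_by A.length - k
  decreasing_by omega

def longestAlternating (A : List Int) : Int :=
  let n := A.length
  let l := (List.range n).map (lA A)
  let res0 : Int := match l with
    | [] => 0        -- unreachable under Pre_ (Python max([]) raises ValueError)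
    | x :: xs => xs.foldl max x
  (List.range' 1 (n-2)).foldl (fun res i =>
    let d := pvCmp (A.getD (i+1) 0) (A.getD (i-1) 0)
    if d ≠ 0 then
      let L := if i > 1 ∧ pvCmp (A.getD (i-1) 0) (A.getD (i-2) 0) = -d then lA A (i-1) else 1
      let R := if i < n-2 ∧ pvCmp (A.getD (i+2) 0) (A.getD (i+1) 0) = -d then rA A (i+1) else 1
      max res (L + R)
    else res) res0

-- ===== PORT B =====
def bstep (A : List Int) (st : Int × Int × Int × Int × Int) (j : Nat) : Int × Int × Int × Int × Int :=
  match st with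
  | (best, e_prev, e_prev2, up, dn) =>
    let d := pvCmp (A.getD j 0) (A.getD (j-1) 0)
    let e_cur : Int :=
      if d ≠ 0 then
        if j > 1 ∧ pvCmp (A.getD (j-1) 0) (A.getD (j-2) 0) = -d then e_prev + 1 else 2
      else 1
    let nup0 : Int := if d = 1 ∧ dn ≠ 0 then dn + 1 else 0
    let ndn0 : Int := if d = -1 ∧ up ≠ 0 then up + 1 else 0
    let p : Int × Int :=
      if 2 ≤ j then
        let e := pvCmp (A.getD j 0) (A.getD (j-2) 0)
        if e ≠ 0 then
          let Lp : Int := if j > 2 ∧ pvCmp (A.getD (j-2) 0) (A.getD (j-3) 0) = -e then e_prev2 else 1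
          let cand := Lp + 1
          if e = 1 then (max nup0 cand, ndn0) else (nup0, max ndn0 cand)
        else (nup0, ndn0)
      else (nup0, ndn0)
    (max (max (max best e_cur) p.1) p.2, e_cur, e_prev, p.1, p.2)

def longestAlternating_alt (A : List Int) : Int :=
  let n := A.length
  if n = 0 then 0
  else ((List.range' 1 (n-1)).foldl (bstep A) (1, 1, 0, 0, 0)).1

-- ===== PRECONDITION & SPEC =====
-- Pre_ excludes only the empty list, on which Python A raises ValueError (max of empty sequence).
def Pre_longestAlternating (A : List Int) : Prop := A ≠ []
instance (A : List Int) : Decidable (Pre_longestAlternating A) := by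
  unfold Pre_longestAlternating; infer_instance
def pvWitness_longestAlternating : List Int := [1, 2, 1]

def Spec_longestAlternating (A : List Int) (out : Int) : Prop := out = longestAlternating_alt A
instance (A : List Int) (out : Int) : Decidable (Spec_longestAlternating A out) := by
  unfold Spec_longestAlternating; infer_instance

-- ===== CLAIM (what is proved, stated in full; the proofs are below) =====
def Claim_equal_longestAlternating : Prop :=
  ∀ (A : List Int), Dom_longestAlternating A → Pre_longestAlternating A →
    Spec_longestAlternating A (longestAlternating A)

-- ===== LEMMAS AND PROOFS =====

-- step direction between positions u and u+1
def sdir (A : List Int) (u : Nat) : Int := pvCmp (A.getD (u+1) 0) (A.getD u 0)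
-- join direction when element i is removed
def edir (A : List Int) (i : Nat) : Int := pvCmp (A.getD (i+1) 0) (A.getD (i-1) 0)
-- A's L value for removal position i
def Lv (A : List Int) (i : Nat) : Int :=
  if i > 1 ∧ pvCmp (A.getD (i-1) 0) (A.getD (i-2) 0) = -(edir A i) then lA A (i-1) else 1
-- A's R value for removal position i
def Rv (A : List Int) (i : Nat) : Int :=
  if i < A.length - 2 ∧ pvCmp (A.getD (i+2) 0) (A.getD (i+1) 0) = -(edir A i) then rA A (i+1) else 1
-- direction of the one-removal chain started at i, at position i+t (t ≥ 1)
def dirAt (A : List Int) (i t : Nat) : Int := if t = 1 then edir A i else sdir A (i+t-1)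

-- spec recurrences mirroring B's sweep
def UD (A : List Int) : Nat → Int × Int
  | 0 => (0, 0)
  | j+1 =>
    let ud := UD A j
    let d := sdir A j
    let nup : Int := if d = 1 ∧ ud.2 ≠ 0 then ud.2 + 1 else 0
    let ndn : Int := if d = -1 ∧ ud.1 ≠ 0 then ud.1 + 1 else 0
    if 1 ≤ j ∧ edir A j ≠ 0 then
      let cand := Lv A j + 1
      if edir A j = 1 then (max nup cand, ndn) else (nup, max ndn cand)
    else (nup, ndn)

def Ml (A : List Int) : Nat → Int
  | 0 => lA A 0
  | m+1 => max (Ml A m) (lA A (m+1))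

def Comb (A : List Int) : Nat → Int
  | 0 => Ml A (A.length - 1)
  | m+1 => if edir A (m+1) ≠ 0 then max (Comb A m) (Lv A (m+1) + Rv A (m+1)) else Comb A m

def Bspec (A : List Int) : Nat → Int
  | 0 => 1
  | m+1 => max (max (max (Bspec A m) (lA A (m+1))) (UD A (m+1)).1) (UD A (m+1)).2

theorem lA_ge_one (A : List Int) (j : Nat) : 1 ≤ lA A j := by
  induction j with
  | zero => simp [lA]
  | succ j ih => simp only [lA]; split_ifs <;> omega

theorem Lv_ge_one (A : List Int) (i : Nat) : 1 ≤ Lv A i := by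
  unfold Lv; split_ifs
  · exact lA_ge_one A (i-1)
  · omega

theorem rA_ge_one (A : List Int) (k : Nat) : 1 ≤ rA A k := by
  rw [rA]
  split_ifs with h1 h2 h3
  · have := rA_ge_one A (k+1)
    omega
  · omega
  · omega
  · omega
  termination_by A.length - k
  decreasing_by omega

theorem Rv_ge_one (A : List Int) (i : Nat) : 1 ≤ Rv A i := by
  unfold Rv; split_ifs
  · exact rA_ge_one A (i+1)
  · omega

theorem rA_le (A : List Int) (k : Nat) (h : k + 1 ≤ A.length) : rA A k ≤ (A.length : Int) - k := by
  rw [rA]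
  split_ifs with h1 h2 h3
  · have := rA_le A (k+1) (by omega)
    omega
  · omega
  · omega
  · omega
  termination_by A.length - k
  decreasing_by omega

theorem rA_succ_iff (A : List Int) (t : Nat) (ht : 1 ≤ t) (k : Nat) :
    ((t : Int) + 1 ≤ rA A k) ↔
      ((t : Int) ≤ rA A k ∧ k + t + 1 ≤ A.length ∧ sdir A (k+t-1) ≠ 0 ∧
        (2 ≤ t → sdir A (k+t-1) = -sdir A (k+t-2))) := by
  induction t, ht using Nat.le_induction generalizing k with
  | base =>
    simp only [Nat.add_sub_cancel, sdir]
    rw [rA]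
    have hr1 := rA_ge_one A (k+1)
    split_ifs with h1 h2 h3 <;> push_cast at * <;> first
      | omega
      | (simp only [false_implies, true_implies, and_true, true_and, true_iff, false_iff,
          not_not, not_and, not_lt, not_le] at * <;> omega)
  | succ t ht ih =>
    simp only [show k+(t+1)-1 = k+t from by omega, show k+(t+1)-2 = k+t-1 from by omega, sdir]
    have iH := ih (k+1)
    simp only [show k+1+t-1 = k+t from by omega, show k+1+t-2 = k+t-1 from by omega,
      Nat.add_sub_cancel, sdir] at iH
    rw [rA]
    have hr1 := rA_ge_one A (k+1)
    rcases Nat.lt_or_ge t 2 with htt | htt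
    · obtain rfl : t = 1 := by omega
      simp only [show k+1+1 = k+2 from rfl, Nat.add_sub_cancel] at *
      split_ifs with h1 h2 h3 <;> push_cast at * <;> first
      | omega
      | (simp only [false_implies, true_implies, and_true, true_and, true_iff, false_iff,
          not_not, not_and, not_lt, not_le] at * <;> omega)
    · split_ifs with h1 h2 h3 <;> push_cast at * <;> first
      | omega
      | (simp only [false_implies, true_implies, and_true, true_and, true_iff, false_iff,
          not_not, not_and, not_lt, not_le] at * <;> omega)

-- one chain-extension step, phrased on Rv
theorem runStep (A : List Int) (i t : Nat) (hi1 : 1 ≤ i) (hi2 : i + 2 ≤ A.length)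
    (he : edir A i ≠ 0) (ht : 1 ≤ t) :
    ((t : Int) + 1 ≤ Rv A i) ↔
      ((t : Int) ≤ Rv A i ∧ i + t + 2 ≤ A.length ∧ sdir A (i+t) = -(dirAt A i t)) := by
  unfold Rv
  by_cases hb : i < A.length - 2 ∧ pvCmp (A.getD (i+2) 0) (A.getD (i+1) 0) = -(edir A i)
  · rw [if_pos hb]
    obtain ⟨hb1, hb2⟩ := hb
    have hr1 := rA_ge_one A (i+1)
    rcases Nat.lt_or_ge t 2 with htt | htt
    · obtain rfl : t = 1 := by omega
      have hiff := rA_succ_iff A 1 (by omega) (i+1)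
      simp only [Nat.add_sub_cancel, sdir, edir, dirAt, if_pos rfl, ite_true] at *
      simp only [show i+1+1 = i+2 from rfl] at *
      omega
    · have hiff := rA_succ_iff A t (by omega) (i+1)
      have hiff2 := rA_succ_iff A (t-1) (by omega) (i+1)
      simp only [dirAt, if_neg (show ¬ t = 1 by omega)]
      simp only [show i+1+t-1 = i+t from by omega, show i+1+t-2 = i+t-1 from by omega,
        show i+1+(t-1)-1 = i+t-1 from by omega, show i+1+(t-1)-2 = i+t-2 from by omega]
        at hiff hiff2
      push_cast [show ((t:ℕ) - 1 : ℤ) = (t : ℤ) - 1 from by omega] at hiff2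
      omega
  · rw [if_neg hb]
    rcases Nat.lt_or_ge t 2 with htt | htt
    · obtain rfl : t = 1 := by omega
      simp only [dirAt, if_pos rfl, ite_true, edir, sdir, not_and] at *
      simp only [show i+1+1 = i+2 from rfl] at *
      omega
    · simp only [dirAt, if_neg (show ¬ t = 1 by omega)]
      omega

theorem Rv_le (A : List Int) (i : Nat) (hi2 : i + 2 ≤ A.length) :
    Rv A i ≤ (A.length : Int) - i - 1 := by
  unfold Rv; split_ifs with h
  · have := rA_le A (i+1) (by omega); push_cast at this ⊢; omega
  · omega

-- (2a) invariant machinery: Q A j s v says v is dominated by a live chain ending at j with direction s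
def Q (A : List Int) (j : Nat) (s : Int) (v : Int) : Prop :=
  v = 0 ∨ ∃ i t, 1 ≤ i ∧ i + 2 ≤ A.length ∧ edir A i ≠ 0 ∧ 1 ≤ t ∧ j = i + t ∧
    (t : Int) ≤ Rv A i ∧ v ≤ Lv A i + t ∧ dirAt A i t = s

theorem Q_zero (A : List Int) (j : Nat) (s : Int) : Q A j s 0 := Or.inl rfl

theorem Q_max (A : List Int) (j : Nat) (s a b : Int) (ha : Q A j s a) (hb : Q A j s b) :
    Q A j s (max a b) := by
  rcases max_choice a b with h | h <;> rw [h] <;> assumption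

theorem Q_ext (A : List Int) (j : Nat) (s v : Int) (hn : j + 2 ≤ A.length)
    (hQ : Q A j (-s) v) (hv : v ≠ 0) (hsd : sdir A j = s) : Q A (j+1) s (v+1) := by
  rcases hQ with h0 | ⟨i, t, hi1, hi2, he, ht1, hjit, htR, hle, hdir⟩
  · exact absurd h0 hv
  · refine Or.inr ⟨i, t+1, hi1, hi2, he, by omega, by omega, ?_, ?_, ?_⟩
    · have hstep := (runStep A i t hi1 hi2 he ht1).mpr
        ⟨htR, by omega, by rw [← hjit, hsd, hdir, neg_neg]⟩
      push_cast
      omega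
    · push_cast
      omega
    · unfold dirAt
      rw [if_neg (by omega : ¬ t + 1 = 1),
        show i + (t+1) - 1 = j from by omega, hsd]

theorem Q_del (A : List Int) (j : Nat) (s : Int) (h1 : 1 ≤ j) (hn : j + 2 ≤ A.length)
    (he : edir A j ≠ 0) (hs : edir A j = s) : Q A (j+1) s (Lv A j + 1) := by
  refine Or.inr ⟨j, 1, h1, hn, he, le_refl 1, rfl, by exact_mod_cast Rv_ge_one A j,
    by push_cast; omega, ?_⟩
  unfold dirAt
  rw [if_pos rfl]
  exact hs

-- (2a) invariant: every nonzero U/D value is dominated by a live chain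
theorem UD_bound (A : List Int) (j : Nat) (hj : j + 1 ≤ A.length) :
    ((UD A j).1 = 0 ∨ ∃ i t, 1 ≤ i ∧ i + 2 ≤ A.length ∧ edir A i ≠ 0 ∧ 1 ≤ t ∧ j = i + t ∧
      (t : Int) ≤ Rv A i ∧ (UD A j).1 ≤ Lv A i + t ∧ dirAt A i t = 1) ∧
    ((UD A j).2 = 0 ∨ ∃ i t, 1 ≤ i ∧ i + 2 ≤ A.length ∧ edir A i ≠ 0 ∧ 1 ≤ t ∧ j = i + t ∧
      (t : Int) ≤ Rv A i ∧ (UD A j).2 ≤ Lv A i + t ∧ dirAt A i t = -1) := by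
  revert hj
  induction j with
  | zero => exact fun _ => ⟨Or.inl rfl, Or.inl rfl⟩
  | succ j ih =>
    intro hj
    have ihj := ih (by omega)
    have ih1 : Q A j 1 (UD A j).1 := ihj.1
    have ih2 : Q A j (-1) (UD A j).2 := ihj.2
    have hnup : Q A (j+1) 1
        (if sdir A j = 1 ∧ (UD A j).2 ≠ 0 then (UD A j).2 + 1 else 0) := by
      by_cases hc : sdir A j = 1 ∧ (UD A j).2 ≠ 0
      · rw [if_pos hc]
        exact Q_ext A j 1 _ (by omega) ih2 hc.2 hc.1
      · rw [if_neg hc]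
        exact Q_zero A (j+1) 1
    have hndn : Q A (j+1) (-1)
        (if sdir A j = -1 ∧ (UD A j).1 ≠ 0 then (UD A j).1 + 1 else 0) := by
      by_cases hc : sdir A j = -1 ∧ (UD A j).1 ≠ 0
      · rw [if_pos hc]
        exact Q_ext A j (-1) _ (by omega) (by rw [neg_neg]; exact ih1) hc.2 hc.1
      · rw [if_neg hc]
        exact Q_zero A (j+1) (-1)
    by_cases hbr : 1 ≤ j ∧ edir A j ≠ 0
    · by_cases he1 : edir A j = 1
      · have hUD : UD A (j+1) =
            (max (if sdir A j = 1 ∧ (UD A j).2 ≠ 0 then (UD A j).2 + 1 else 0) (Lv A j + 1),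
             (if sdir A j = -1 ∧ (UD A j).1 ≠ 0 then (UD A j).1 + 1 else 0)) := by
          simp only [UD, if_pos hbr, if_pos he1]
        rw [hUD]
        exact ⟨Q_max A (j+1) 1 _ _ hnup (Q_del A j 1 hbr.1 hj hbr.2 he1), hndn⟩
      · have hUD : UD A (j+1) =
            ((if sdir A j = 1 ∧ (UD A j).2 ≠ 0 then (UD A j).2 + 1 else 0),
             max (if sdir A j = -1 ∧ (UD A j).1 ≠ 0 then (UD A j).1 + 1 else 0) (Lv A j + 1)) := by
          simp only [UD, if_pos hbr, if_neg he1]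
        rw [hUD]
        have hem1 : edir A j = -1 := by
          have : edir A j = -1 ∨ edir A j = 0 ∨ edir A j = 1 := by
            unfold edir pvCmp; split_ifs <;> omega
          rcases this with h | h | h
          · exact h
          · exact absurd h hbr.2
          · exact absurd h he1
        exact ⟨hnup, Q_max A (j+1) (-1) _ _ hndn (Q_del A j (-1) hbr.1 hj hbr.2 hem1)⟩
    · have hUD : UD A (j+1) =
          ((if sdir A j = 1 ∧ (UD A j).2 ≠ 0 then (UD A j).2 + 1 else 0),
           (if sdir A j = -1 ∧ (UD A j).1 ≠ 0 then (UD A j).1 + 1 else 0)) := by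
        simp only [UD, if_neg hbr]
      rw [hUD]
      exact ⟨hnup, hndn⟩

theorem edir_cases (A : List Int) (i : Nat) :
    edir A i = -1 ∨ edir A i = 0 ∨ edir A i = 1 := by
  unfold edir pvCmp; split_ifs <;> omega

theorem UD_ge (A : List Int) (j : Nat) :
    (if sdir A j = 1 ∧ (UD A j).2 ≠ 0 then (UD A j).2 + 1 else 0) ≤ (UD A (j+1)).1 ∧
    (if sdir A j = -1 ∧ (UD A j).1 ≠ 0 then (UD A j).1 + 1 else 0) ≤ (UD A (j+1)).2 := by
  simp only [UD]
  split_ifs <;>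
    constructor <;>
    first
      | exact le_refl _
      | exact le_max_left _ _

theorem UD_ge_cand (A : List Int) (j : Nat) (h1 : 1 ≤ j) (he : edir A j ≠ 0) :
    (edir A j = 1 → Lv A j + 1 ≤ (UD A (j+1)).1) ∧
    (edir A j = -1 → Lv A j + 1 ≤ (UD A (j+1)).2) := by
  simp only [UD, if_pos (show 1 ≤ j ∧ edir A j ≠ 0 from ⟨h1, he⟩)]
  constructor <;> intro h
  · rw [if_pos h]
    exact le_max_right _ _
  · rw [if_neg (show ¬ edir A j = 1 from by rw [h]; norm_num)]
    exact le_max_right _ _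

-- (2b) the chain for removal position i is realised by the sweep
theorem UD_attain (A : List Int) (i : Nat) (hi1 : 1 ≤ i) (hi2 : i + 2 ≤ A.length)
    (he : edir A i ≠ 0) (t : Nat) (ht : 1 ≤ t) (htR : (t : Int) ≤ Rv A i) :
    (dirAt A i t = 1 ∨ dirAt A i t = -1) ∧
    (dirAt A i t = 1 → Lv A i + t ≤ (UD A (i+t)).1) ∧
    (dirAt A i t = -1 → Lv A i + t ≤ (UD A (i+t)).2) := by
  revert htR
  induction t, ht using Nat.le_induction with
  | base =>
    intro htR
    have hdir : dirAt A i 1 = edir A i := by unfold dirAt; rw [if_pos rfl]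
    have hec := edir_cases A i
    have hc := UD_ge_cand A i hi1 he
    refine ⟨?_, ?_, ?_⟩
    · rw [hdir]
      rcases hec with h | h | h
      · exact Or.inr h
      · exact absurd h he
      · exact Or.inl h
    · intro h
      rw [hdir] at h
      have := hc.1 h
      push_cast
      omega
    · intro h
      rw [hdir] at h
      have := hc.2 h
      push_cast
      omega
  | succ t ht ih =>
    intro htR
    obtain ⟨htR', hlen, hsd⟩ := (runStep A i t hi1 hi2 he ht).mp (by push_cast at htR ⊢; omega)
    obtain ⟨hpm, h1, h2⟩ := ih htR'
    have hdir1 : dirAt A i (t+1) = sdir A (i+t) := by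
      unfold dirAt
      rw [if_neg (show ¬ t + 1 = 1 by omega), show i + (t+1) - 1 = i + t from by omega]
    have hLv := Lv_ge_one A i
    refine ⟨?_, ?_, ?_⟩
    · rw [hdir1, hsd]
      rcases hpm with h | h
      · exact Or.inr (by rw [h])
      · exact Or.inl (by rw [h, neg_neg])
    · intro hnew
      rw [hdir1] at hnew
      have hdm : dirAt A i t = -1 := by
        rcases hpm with h | h
        · rw [h] at hsd; rw [hsd] at hnew; norm_num at hnew
        · exact h
      have hv := h2 hdm
      have hne : (UD A (i+t)).2 ≠ 0 := by push_cast at hv; omega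
      have hge1 := (UD_ge A (i+t)).1
      rw [if_pos ⟨hnew, hne⟩] at hge1
      rw [show i + (t+1) = i + t + 1 from by omega]
      push_cast at hv ⊢
      omega
    · intro hnew
      rw [hdir1] at hnew
      have hdm : dirAt A i t = 1 := by
        rcases hpm with h | h
        · exact h
        · rw [h] at hsd; rw [hsd] at hnew; norm_num at hnew
      have hv := h1 hdm
      have hne : (UD A (i+t)).1 ≠ 0 := by push_cast at hv; omega
      have hge2 := (UD_ge A (i+t)).2
      rw [if_pos ⟨hnew, hne⟩] at hge2
      rw [show i + (t+1) = i + t + 1 from by omega]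
      push_cast at hv ⊢
      omega

theorem one_le_Ml (A : List Int) (m : Nat) : 1 ≤ Ml A m := by
  induction m with
  | zero => simpa [Ml] using lA_ge_one A 0
  | succ m ih => simp only [Ml]; omega

theorem lA_le_Ml (A : List Int) (j m : Nat) (h : j ≤ m) : lA A j ≤ Ml A m := by
  induction m with
  | zero => interval_cases j; simp [Ml]
  | succ m ih =>
    simp only [Ml]
    rcases Nat.lt_or_ge j (m+1) with h' | h'
    · have := ih (by omega); omega
    · have : j = m + 1 := by omega
      subst this; omega

theorem Ml_le (A : List Int) (m : Nat) (X : Int) (h : ∀ j, j ≤ m → lA A j ≤ X) :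
    Ml A m ≤ X := by
  induction m with
  | zero => simpa [Ml] using h 0 (by omega)
  | succ m ih =>
    simp only [Ml]
    have h1 := ih (fun j hj => h j (by omega))
    have h2 := h (m+1) (by omega)
    omega

theorem Ml_le_Comb (A : List Int) (m : Nat) : Ml A (A.length - 1) ≤ Comb A m := by
  induction m with
  | zero => simp [Comb]
  | succ m ih => simp only [Comb]; split_ifs <;> omega

theorem cand_le_Comb (A : List Int) (i m : Nat) (hi1 : 1 ≤ i) (him : i ≤ m)
    (he : edir A i ≠ 0) : Lv A i + Rv A i ≤ Comb A m := by
  induction m with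
  | zero => omega
  | succ m ih =>
    simp only [Comb]
    rcases Nat.lt_or_ge i (m+1) with h' | h'
    · have := ih (by omega); split_ifs <;> omega
    · have : i = m + 1 := by omega
      subst this
      simp [he]

theorem Comb_le (A : List Int) (m : Nat) (X : Int) (h0 : Ml A (A.length - 1) ≤ X)
    (h : ∀ i, 1 ≤ i → i ≤ m → edir A i ≠ 0 → Lv A i + Rv A i ≤ X) : Comb A m ≤ X := by
  induction m with
  | zero => simpa [Comb] using h0
  | succ m ih =>
    simp only [Comb]
    have h1 := ih (fun i a b c => h i a (by omega) c)
    split_ifs with hd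
    · have h2 := h (m+1) (by omega) (by omega) hd
      omega
    · exact h1

theorem one_le_Bspec (A : List Int) (m : Nat) : 1 ≤ Bspec A m := by
  induction m with
  | zero => simp [Bspec]
  | succ m ih => simp only [Bspec]; omega

theorem lA_le_Bspec (A : List Int) (j m : Nat) (h : j ≤ m) : lA A j ≤ Bspec A m := by
  induction m with
  | zero => interval_cases j; simpa [Bspec] using lA_ge_one A 0
  | succ m ih =>
    simp only [Bspec]
    rcases Nat.lt_or_ge j (m+1) with h' | h'
    · have := ih (by omega); omega
    · have : j = m + 1 := by omega
      subst this; omega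

theorem UD_le_Bspec (A : List Int) (j m : Nat) (h1 : 1 ≤ j) (h : j ≤ m) :
    (UD A j).1 ≤ Bspec A m ∧ (UD A j).2 ≤ Bspec A m := by
  induction m with
  | zero => omega
  | succ m ih =>
    simp only [Bspec]
    rcases Nat.lt_or_ge j (m+1) with h' | h'
    · have := ih (by omega); omega
    · have : j = m + 1 := by omega
      subst this; omega

theorem Bspec_le (A : List Int) (m : Nat) (X : Int) (h0 : 1 ≤ X)
    (h : ∀ j, 1 ≤ j → j ≤ m → lA A j ≤ X ∧ (UD A j).1 ≤ X ∧ (UD A j).2 ≤ X) :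
    Bspec A m ≤ X := by
  induction m with
  | zero => simpa [Bspec] using h0
  | succ m ih =>
    simp only [Bspec]
    have h1 := ih (fun j a b => h j a (by omega))
    have h2 := h (m+1) (by omega) (by omega)
    omega

-- the heart: A's (max l / combine) value equals B's sweep value
theorem Comb_eq_Bspec (A : List Int) (hA : 1 ≤ A.length) :
    Comb A (A.length - 2) = Bspec A (A.length - 1) := by
  apply le_antisymm
  · apply Comb_le
    · apply Ml_le
      intro j hj
      rcases Nat.eq_zero_or_pos j with h | h
      · subst h
        have : lA A 0 = 1 := by simp [lA]
        rw [this]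
        exact one_le_Bspec A _
      · exact lA_le_Bspec A j _ hj
    · intro i h1 h2 he
      have hi2 : i + 2 ≤ A.length := by omega
      have hR1 : 1 ≤ Rv A i := Rv_ge_one A i
      set t := (Rv A i).toNat with htdef
      have ht : (t : Int) = Rv A i := Int.toNat_of_nonneg (by omega)
      have hRle := Rv_le A i hi2
      have htn : i + t ≤ A.length - 1 := by omega
      have h6 := UD_attain A i h1 hi2 he t (by omega) (by omega)
      rcases h6.1 with hd | hd
      · have hat := h6.2.1 hd
        have hb := (UD_le_Bspec A (i+t) (A.length-1) (by omega) htn).1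
        omega
      · have hat := h6.2.2 hd
        have hb := (UD_le_Bspec A (i+t) (A.length-1) (by omega) htn).2
        omega
  · have hMC := Ml_le_Comb A (A.length - 2)
    have hM1 := one_le_Ml A (A.length - 1)
    apply Bspec_le
    · omega
    · intro j h1 hj
      have hlj : lA A j ≤ Comb A (A.length - 2) :=
        le_trans (lA_le_Ml A j (A.length - 1) hj) hMC
      refine ⟨hlj, ?_, ?_⟩
      · rcases (UD_bound A j (by omega)).1 with h0 | ⟨i, t, hi1, hi2, he, ht1, hjit, htR, hle, _⟩
        · omega
        · have hcand := cand_le_Comb A i (A.length-2) hi1 (by omega) he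
          omega
      · rcases (UD_bound A j (by omega)).2 with h0 | ⟨i, t, hi1, hi2, he, ht1, hjit, htR, hle, _⟩
        · omega
        · have hcand := cand_le_Comb A i (A.length-2) hi1 (by omega) he
          omega

-- bridging: the port folds compute the spec recurrences
theorem lA_step (A : List Int) (m : Nat) :
    (if pvCmp (A.getD (m+1) 0) (A.getD m 0) ≠ 0 then
      if m+1 > 1 ∧ pvCmp (A.getD m 0) (A.getD (m-1) 0) = -(pvCmp (A.getD (m+1) 0) (A.getD m 0))
      then lA A m + 1 else 2
    else 1) = lA A (m+1) := by
  rw [lA]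

theorem UD_step (A : List Int) (m : Nat) :
    (if 2 ≤ m + 1 then
      if pvCmp (A.getD (m+1) 0) (A.getD (m-1) 0) ≠ 0 then
        if pvCmp (A.getD (m+1) 0) (A.getD (m-1) 0) = 1 then
          (max (if pvCmp (A.getD (m+1) 0) (A.getD m 0) = 1 ∧ (UD A m).2 ≠ 0 then (UD A m).2 + 1 else 0)
            ((if m+1 > 2 ∧ pvCmp (A.getD (m-1) 0) (A.getD (m-2) 0) =
                -(pvCmp (A.getD (m+1) 0) (A.getD (m-1) 0)) then
              (if m = 0 then (0:Int) else lA A (m-1)) else 1) + 1),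
           (if pvCmp (A.getD (m+1) 0) (A.getD m 0) = -1 ∧ (UD A m).1 ≠ 0 then (UD A m).1 + 1 else 0))
        else
          ((if pvCmp (A.getD (m+1) 0) (A.getD m 0) = 1 ∧ (UD A m).2 ≠ 0 then (UD A m).2 + 1 else 0),
           max (if pvCmp (A.getD (m+1) 0) (A.getD m 0) = -1 ∧ (UD A m).1 ≠ 0 then (UD A m).1 + 1 else 0)
            ((if m+1 > 2 ∧ pvCmp (A.getD (m-1) 0) (A.getD (m-2) 0) =
                -(pvCmp (A.getD (m+1) 0) (A.getD (m-1) 0)) then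
              (if m = 0 then (0:Int) else lA A (m-1)) else 1) + 1))
      else
        ((if pvCmp (A.getD (m+1) 0) (A.getD m 0) = 1 ∧ (UD A m).2 ≠ 0 then (UD A m).2 + 1 else 0),
         (if pvCmp (A.getD (m+1) 0) (A.getD m 0) = -1 ∧ (UD A m).1 ≠ 0 then (UD A m).1 + 1 else 0))
    else
      ((if pvCmp (A.getD (m+1) 0) (A.getD m 0) = 1 ∧ (UD A m).2 ≠ 0 then (UD A m).2 + 1 else 0),
       (if pvCmp (A.getD (m+1) 0) (A.getD m 0) = -1 ∧ (UD A m).1 ≠ 0 then (UD A m).1 + 1 else 0)))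
    = UD A (m+1) := by
  rw [UD]
  simp only [sdir, edir, Lv]
  by_cases h1 : 1 ≤ m
  · have hm0 : ¬ (m = 0) := by omega
    rw [if_pos (show 2 ≤ m + 1 by omega), if_neg hm0]
    simp only [show ((m:Nat) + 1 > 2) = (m > 1) from propext (by omega)]
    by_cases he : pvCmp (A.getD (m+1) 0) (A.getD (m-1) 0) ≠ 0
    · rw [if_pos he]
      rw [if_pos (And.intro h1 he)]
      rfl
    · rw [if_neg he]
      rw [if_neg (show ¬ (1 ≤ m ∧ pvCmp (A.getD (m+1) 0) (A.getD (m-1) 0) ≠ 0) from by tauto)]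
      rfl
  · have hm0 : m = 0 := by omega
    subst hm0
    rw [if_neg (show ¬ ((2:Nat) ≤ 0 + 1) by omega)]
    rw [if_neg (show ¬ ((1:Nat) ≤ 0 ∧ pvCmp (A.getD (0+1) 0) (A.getD (0-1) 0) ≠ 0) from by
      simp)]
    rfl

theorem bstep_spec (A : List Int) (m : Nat) :
    bstep A (Bspec A m, lA A m, (if m = 0 then 0 else lA A (m-1)), (UD A m).1, (UD A m).2) (m+1) =
      (Bspec A (m+1), lA A (m+1), lA A m, (UD A (m+1)).1, (UD A (m+1)).2) := by
  simp only [bstep,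
    show (m + 1 - 1 : Nat) = m from rfl,
    show (m + 1 - 2 : Nat) = m - 1 from rfl,
    show (m + 1 - 3 : Nat) = m - 2 from rfl]
  rw [lA_step, UD_step]
  rw [Bspec]

theorem foldB_eq (A : List Int) (m : Nat) :
    (List.range' 1 m).foldl (bstep A) (1, 1, 0, 0, 0) =
      (Bspec A m, lA A m, (if m = 0 then 0 else lA A (m-1)), (UD A m).1, (UD A m).2) := by
  induction m with
  | zero => simp [Bspec, lA, UD]
  | succ m ih =>
    rw [List.range'_1_concat, List.foldl_append, ih]
    simp only [List.foldl_cons, List.foldl_nil]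
    have h1 : 1 + m = m + 1 := by omega
    rw [h1, bstep_spec]
    simp

theorem foldMl (A : List Int) (m : Nat) :
    ((List.range' 1 m).map (lA A)).foldl max (lA A 0) = Ml A m := by
  induction m with
  | zero => simp [Ml]
  | succ m ih =>
    rw [List.range'_1_concat, List.map_append, List.foldl_append, ih]
    have h1 : 1 + m = m + 1 := by omega
    simp [Ml, h1]

theorem res0_eq (A : List Int) (hA : 1 ≤ A.length) :
    (match (List.range A.length).map (lA A) with
      | [] => (0 : Int)
      | x :: xs => xs.foldl max x) = Ml A (A.length - 1) := by
  obtain ⟨m, hm⟩ : ∃ m, A.length = m + 1 := ⟨A.length - 1, by omega⟩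
  rw [hm]
  rw [List.range_eq_range', List.range'_succ, List.map_cons]
  simp only [Nat.add_sub_cancel, Nat.zero_add]
  exact foldMl A m

theorem foldComb (A : List Int) (m : Nat) :
    (List.range' 1 m).foldl (fun res i =>
      let d := pvCmp (A.getD (i+1) 0) (A.getD (i-1) 0)
      if d ≠ 0 then
        let L := if i > 1 ∧ pvCmp (A.getD (i-1) 0) (A.getD (i-2) 0) = -d then lA A (i-1) else 1
        let R := if i < A.length-2 ∧ pvCmp (A.getD (i+2) 0) (A.getD (i+1) 0) = -d then rA A (i+1) else 1
        max res (L + R)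
      else res) (Ml A (A.length - 1)) = Comb A m := by
  induction m with
  | zero => simp [Comb]
  | succ m ih =>
    rw [List.range'_1_concat, List.foldl_append, ih]
    have h1 : 1 + m = m + 1 := by omega
    simp only [List.foldl_cons, List.foldl_nil, h1, Comb, edir, Lv, Rv]
    rfl

theorem combine_eq (A : List Int) (hA : 1 ≤ A.length) :
    longestAlternating A = Comb A (A.length - 2) := by
  unfold longestAlternating
  dsimp only
  rw [res0_eq A hA]
  exact foldComb A (A.length - 2)

-- ===== VERDICT (by name: the statement is the Claim_ definition above) =====
theorem longestAlternating_spec : Claim_equal_longestAlternating := by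
  intro A _ hpre
  unfold Spec_longestAlternating
  have hA : 1 ≤ A.length := by
    cases A with
    | nil => exact absurd rfl hpre
    | cons a t => simp
  rw [combine_eq A hA, Comb_eq_Bspec A hA]
  unfold longestAlternating_alt
  have hn : ¬ (A.length = 0) := by omega
  rw [if_neg hn, foldB_eq A (A.length - 1)]
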